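-- pv_equiv track=rewrite | github.com/NetworkArchetype/PLM | validation_np_hard/np_benchmarks.py | solve_vertex_cover_bruteforce
-- ===== SOURCE A (Python) =====
-- from typing import Any, Dict, Iterable, List, Optional, Sequence, Tuple
--
-- Edge = Tuple[int, int]
--
-- def _covers_all(edges: Sequence[Edge], cover: Sequence[bool]) -> bool:
--     for u, v in edges:
--         if not (cover[u] or cover[v]):
--             return False
--     return True
--
-- def solve_vertex_cover_bruteforce(edges: Sequence[Edge], n: int, k: int) -> Optional[List[bool]]:
--     # Find a vertex cover of size <= k via brute force combinations (worst-case).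
--     # For small n only.
--     idxs = list(range(n))
--
--     def rec(start: int, chosen: List[int]) -> Optional[List[bool]]:
--         if len(chosen) > k:
--             return None
--         if start == n:
--             cover = [False] * n
--             for i in chosen:
--                 cover[i] = True
--             return cover if _covers_all(edges, cover) else None
--         # pruning: try without/with
--         out = rec(start + 1, chosen)
--         if out is not None:
--             return out
--         chosen.append(start)
--         out = rec(start + 1, chosen)
--         chosen.pop()
--         return out
--
--     return rec(0, [])
-- ===== SOURCE B (Python) =====
-- # FPT-style exact re-implementation: a 2^k branching feasibility oracle plus a
-- # greedy vertex-by-vertex lexicographic reconstruction (exclude-first order).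
-- def solve_vertex_cover_bruteforce(edges, n, k):
--     def feasible(budget, es, lo):
--         # exists a vertex cover of es of size <= budget using only vertices >= lo?
--         if not es:
--             return True
--         if budget == 0:
--             return False
--         u, v = es[0]
--         if u >= lo and feasible(budget - 1, [e for e in es if e[0] != u and e[1] != u], lo):
--             return True
--         if v >= lo and feasible(budget - 1, [e for e in es if e[0] != v and e[1] != v], lo):
--             return True
--         return False
--
--     if k < 0:
--         return None
--     if not feasible(k, list(edges), 0):
--         return None
--     cover = [False] * n
--     rem = list(edges)
--     budget = k
--     for i in range(n):
--         if feasible(budget, rem, i + 1):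
--             continue  # vertex i is not needed: keep it excluded (lex-min)
--         cover[i] = True
--         rem = [e for e in rem if e[0] != i and e[1] != i]
--         budget -= 1
--     return cover
-- ===== Notes on version B (the rewrite author's own statement) =====
-- stated objective: faster
-- what changed: A brute-forces all 2^n vertex subsets in exclude-first order; B decides feasibility with a 2^k branch-on-an-uncovered-edge oracle and then reconstructs the same lexicographically-first cover vertex by vertex with that oracle.
-- outside the precondition, e.g. on solve_vertex_cover_bruteforce([(-1, 0)], 2, 1): A returns [False, True], B returns [True, False]; on solve_vertex_cover_bruteforce([(0, 3)], 2, 1): A raises IndexError, B returns [False, False]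
import Mathlib
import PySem

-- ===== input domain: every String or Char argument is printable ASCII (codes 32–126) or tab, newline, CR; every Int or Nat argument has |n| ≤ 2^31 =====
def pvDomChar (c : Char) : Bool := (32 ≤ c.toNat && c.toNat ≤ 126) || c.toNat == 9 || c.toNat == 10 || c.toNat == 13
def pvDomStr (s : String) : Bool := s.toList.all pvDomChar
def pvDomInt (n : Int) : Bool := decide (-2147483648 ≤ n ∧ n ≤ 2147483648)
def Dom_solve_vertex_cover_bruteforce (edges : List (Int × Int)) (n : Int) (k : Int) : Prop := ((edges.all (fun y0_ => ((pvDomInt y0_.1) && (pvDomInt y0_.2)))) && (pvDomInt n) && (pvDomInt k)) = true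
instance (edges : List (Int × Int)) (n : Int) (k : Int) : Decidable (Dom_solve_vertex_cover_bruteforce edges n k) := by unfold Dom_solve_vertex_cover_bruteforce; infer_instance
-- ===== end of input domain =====

-- B replaces A's O(2^n) subset search by a 2^k branching feasibility oracle with a
-- vertex-by-vertex greedy reconstruction of the same (lexicographically first) cover.

-- ===== PORT A =====
-- cover[u] or cover[v]; pyGetD is exact here because Pre_ excludes the IndexError inputs
def pvCoversAll (edges : List (Int × Int)) (cover : List Bool) : Bool :=
  edges.all (fun e => PySem.List.pyGetD cover e.1 false || PySem.List.pyGetD cover e.2 false)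

-- cover = [False]*n; for i in chosen: cover[i] = True   (chosen holds indices in [0, n))
def pvMkCover (N : Nat) (chosen : List Int) : List Bool :=
  chosen.foldl (fun c i => c.set i.toNat true) (List.replicate N false)

-- rec(start, chosen); Python's mutable append/pop around the second call is the
-- functional argument chosen ++ [start].  start is counted as a Nat up to N = n.toNat
-- (for n < 0 Python never returns: those inputs are outside Pre_ unless k < 0,
--  and for k < 0 the first guard answers before start is ever used).
def pvRecA (edges : List (Int × Int)) (N : Nat) (k : Int) (start : Nat) (chosen : List Int) :
    Option (List Bool) :=
  if (chosen.length : Int) > k then none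
  else if start = N then
    let cover := pvMkCover N chosen
    if pvCoversAll edges cover then some cover else none
  else if _h : start < N then
    match pvRecA edges N k (start + 1) chosen with
    | some out => some out
    | none => pvRecA edges N k (start + 1) (chosen ++ [(start : Int)])
  else none
termination_by N - start
decreasing_by all_goals omega

def solve_vertex_cover_bruteforce (edges : List (Int × Int)) (n : Int) (k : Int) : Option (List Bool) :=
  pvRecA edges n.toNat k 0 []

-- ===== PORT B =====
-- [e for e in es if e[0] != w and e[1] != w]
def pvRemoveTouching (es : List (Int × Int)) (w : Int) : List (Int × Int) :=
  es.filter (fun e => e.1 != w && e.2 != w)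

-- feasible(budget, es, lo): is there a vertex cover of es of size <= budget using
-- only vertices >= lo?  budget counts down from k (k >= 0 here), so Nat is exact.
def pvFeasible : Nat → List (Int × Int) → Int → Bool
  | _, [], _ => true
  | 0, _ :: _, _ => false
  | b + 1, (u, v) :: rest, lo =>
    (decide (u ≥ lo) && pvFeasible b (pvRemoveTouching ((u, v) :: rest) u) lo) ||
    (decide (v ≥ lo) && pvFeasible b (pvRemoveTouching ((u, v) :: rest) v) lo)

-- the 'for i in range(n)' loop, emitting cover[i] per step (m = iterations left)
def pvBuildB : Nat → Nat → List (Int × Int) → Nat → List Bool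
  | 0, _, _, _ => []
  | m + 1, i, rem, b =>
    if pvFeasible b rem ((i : Int) + 1) then
      false :: pvBuildB m (i + 1) rem b
    else
      true :: pvBuildB m (i + 1) (pvRemoveTouching rem (i : Int)) (b - 1)

def solve_vertex_cover_bruteforce_alt (edges : List (Int × Int)) (n : Int) (k : Int) :
    Option (List Bool) :=
  if k < 0 then none
  else if pvFeasible k.toNat edges 0 then some (pvBuildB n.toNat 0 edges k.toNat) else none

-- ===== PRECONDITION & SPEC =====
-- Pre_ admits every k < 0 (A answers None before it ever reads an edge) and otherwise
-- requires 0 ≤ n and edge endpoints inside [0, n).  Excluded, for k ≥ 0: endpoints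
-- ≥ n or < -n, where A raises IndexError (or n < 0, RecursionError), and endpoints in
-- [-n, 0), a corner no caller specifies, where A silently wraps a negative endpoint
-- onto vertex n+u (Python negative indexing) while B reads labels literally.
def Pre_solve_vertex_cover_bruteforce (edges : List (Int × Int)) (n : Int) (k : Int) : Prop :=
  k < 0 ∨ (0 ≤ n ∧ ∀ e ∈ edges, 0 ≤ e.1 ∧ e.1 < n ∧ 0 ≤ e.2 ∧ e.2 < n)
instance (edges : List (Int × Int)) (n : Int) (k : Int) : Decidable (Pre_solve_vertex_cover_bruteforce edges n k) := by unfold Pre_solve_vertex_cover_bruteforce; infer_instance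

def pvWitness_solve_vertex_cover_bruteforce : (List (Int × Int)) × Int × Int := ([(0, 1), (1, 2)], 3, 1)

def Spec_solve_vertex_cover_bruteforce (edges : List (Int × Int)) (n : Int) (k : Int) (out : Option (List Bool)) : Prop := out = solve_vertex_cover_bruteforce_alt edges n k
instance (edges : List (Int × Int)) (n : Int) (k : Int) (out : Option (List Bool)) : Decidable (Spec_solve_vertex_cover_bruteforce edges n k out) := by unfold Spec_solve_vertex_cover_bruteforce; infer_instance

-- ===== CLAIM (what is proved, stated in full; the proofs are below) =====
def Claim_equal_solve_vertex_cover_bruteforce : Prop := ∀ (edges : List (Int × Int)) (n : Int) (k : Int), Dom_solve_vertex_cover_bruteforce edges n k → Pre_solve_vertex_cover_bruteforce edges n k → Spec_solve_vertex_cover_bruteforce edges n k (solve_vertex_cover_bruteforce edges n k)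

-- ===== LEMMAS AND PROOFS =====

-- the common specification both ports are reduced to: the first length-N bool vector,
-- in lexicographic order (False < True), that is a cover of size ≤ k
def pvCheck (edges : List (Int × Int)) (k : Int) (c : List Bool) : Bool :=
  decide ((c.count true : Int) ≤ k) && pvCoversAll edges c

def pvEnum : Nat → List (List Bool)
  | 0 => [[]]
  | m + 1 => (pvEnum m).map (false :: ·) ++ (pvEnum m).map (true :: ·)

-- indices (as Python ints) of the true entries of p, offset by j
def pvIdx (j : Nat) : List Bool → List Int
  | [] => []
  | b :: t => (if b then [(j : Int)] else []) ++ pvIdx (j + 1) t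

-- edges not yet covered by the true entries of the prefix p
def pvRem (edges : List (Int × Int)) (p : List Bool) : List (Int × Int) :=
  edges.filter (fun e => !(PySem.List.pyGetD p e.1 false || PySem.List.pyGetD p e.2 false))

-- existence of a vertex cover of es of size ≤ b among vertices ≥ lo
def pvEx (es : List (Int × Int)) (b : Nat) (lo : Int) : Prop :=
  ∃ S : List Int, S.Nodup ∧ (∀ x ∈ S, lo ≤ x) ∧ S.length ≤ b ∧
    ∀ e ∈ es, e.1 ∈ S ∨ e.2 ∈ S

theorem pvIdx_cons_false (j : Nat) (t : List Bool) : pvIdx j (false :: t) = pvIdx (j + 1) t := by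
  simp [pvIdx]

theorem pvIdx_cons_true (j : Nat) (t : List Bool) :
    pvIdx j (true :: t) = (j : Int) :: pvIdx (j + 1) t := by
  simp [pvIdx]

theorem pvLength_mem_enum : ∀ {m : Nat} {c : List Bool}, c ∈ pvEnum m → c.length = m := by
  intro m
  induction m with
  | zero => intro c h; simp [pvEnum] at h; simp [h]
  | succ m ih =>
    intro c h
    simp only [pvEnum, List.mem_append, List.mem_map] at h
    rcases h with ⟨d, hd, rfl⟩ | ⟨d, hd, rfl⟩ <;> simp [ih hd]

theorem pvIdx_length (j : Nat) (p : List Bool) : (pvIdx j p).length = p.count true := by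
  induction p generalizing j with
  | nil => simp [pvIdx]
  | cons b t ih => cases b <;> simp [pvIdx_cons_false, pvIdx_cons_true, ih]

theorem pvIdx_append (j : Nat) (p : List Bool) (b : Bool) :
    pvIdx j (p ++ [b]) = pvIdx j p ++ (if b then [((j + p.length : Nat) : Int)] else []) := by
  induction p generalizing j with
  | nil => cases b <;> simp [pvIdx_cons_false, pvIdx_cons_true, pvIdx]
  | cons c t ih =>
    have h : (j + 1) + t.length = j + (t.length + 1) := by omega
    cases c <;> cases b <;>
      simp [pvIdx_cons_false, pvIdx_cons_true, List.cons_append, ih (j + 1), h]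

theorem pvMem_pvIdx : ∀ {j : Nat} {p : List Bool} {x : Int}, x ∈ pvIdx j p →
    (j : Int) ≤ x ∧ x < (j : Int) + p.length := by
  intro j p
  induction p generalizing j with
  | nil => intro x h; simp [pvIdx] at h
  | cons b t ih =>
    intro x h
    cases b
    · rw [pvIdx_cons_false] at h
      have := ih h
      simp only [List.length_cons]
      push_cast at this ⊢
      omega
    · rw [pvIdx_cons_true, List.mem_cons] at h
      simp only [List.length_cons]
      rcases h with rfl | h
      · push_cast; omega
      · have := ih h
        push_cast at this ⊢
        omega

theorem pvIdx_nodup (j : Nat) (p : List Bool) : (pvIdx j p).Nodup := by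
  induction p generalizing j with
  | nil => simp [pvIdx]
  | cons b t ih =>
    cases b
    · rw [pvIdx_cons_false]; exact ih (j + 1)
    · rw [pvIdx_cons_true]
      refine List.nodup_cons.mpr ⟨fun h => ?_, ih (j + 1)⟩
      have := pvMem_pvIdx h
      push_cast at this
      omega

theorem pvMem_pvIdx_iff (p : List Bool) (j i : Nat) :
    (((j + i : Nat) : Int) ∈ pvIdx j p) ↔ p.getD i false = true := by
  induction p generalizing j i with
  | nil => simp [pvIdx, List.getD]
  | cons b t ih =>
    cases i with
    | zero =>
      cases b
      · rw [pvIdx_cons_false]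
        simp only [Nat.add_zero, List.getD_cons_zero]
        constructor
        · intro h; have := pvMem_pvIdx h; push_cast at this; omega
        · intro h; cases h
      · rw [pvIdx_cons_true]
        simp only [Nat.add_zero, List.getD_cons_zero, List.mem_cons]
        constructor
        · intro _; trivial
        · intro _; exact Or.inl trivial
    | succ i =>
      have harg : (j + (i + 1) : Nat) = ((j + 1) + i : Nat) := by omega
      rw [harg, List.getD_cons_succ]
      cases b
      · rw [pvIdx_cons_false]; exact ih (j + 1) i
      · rw [pvIdx_cons_true, List.mem_cons]
        constructor
        · rintro (h | h)
          · exfalso; push_cast at h; omega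
          · exact (ih (j + 1) i).mp h
        · intro h; right; exact (ih (j + 1) i).mpr h

theorem pvMkCover_snoc (N : Nat) (l : List Int) (x : Int) :
    pvMkCover N (l ++ [x]) = (pvMkCover N l).set x.toNat true := by
  simp [pvMkCover, List.foldl_append]

theorem pvMkCover_idx (N : Nat) (p : List Bool) (h : p.length ≤ N) :
    pvMkCover N (pvIdx 0 p) = p ++ List.replicate (N - p.length) false := by
  induction p using List.reverseRecOn with
  | nil => simp [pvMkCover, pvIdx]
  | append_singleton t b ih =>
    have ht : t.length ≤ N := by simp at h; omega
    have hrep : N - t.length = (N - (t.length + 1)) + 1 := by simp at h; omega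
    rw [pvIdx_append]
    cases b
    · simp only [if_neg Bool.false_ne_true, List.append_nil]
      rw [ih ht, hrep, List.replicate_succ]
      simp
    · have hif : (if (true : Bool) = true then [((0 + t.length : Nat) : Int)] else ([] : List Int))
          = [((0 + t.length : Nat) : Int)] := rfl
      rw [hif]
      rw [pvMkCover_snoc, ih ht]
      have hto : ((0 + t.length : Nat) : Int).toNat = t.length := by simp
      rw [hto, List.set_append_right _ _ (Nat.le_refl _)]
      rw [hrep, List.replicate_succ]
      simp

-- A's recursion = find-first over the lexicographic enumeration of completions
theorem pvRecA_eq_find (edges : List (Int × Int)) (N : Nat) (k : Int) :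
    ∀ (m : Nat) (p : List Bool), p.length + m = N →
      pvRecA edges N k p.length (pvIdx 0 p) =
        ((pvEnum m).map (fun s => p ++ s)).find? (pvCheck edges k) := by
  intro m
  induction m with
  | zero =>
    intro p hp
    rw [pvRecA]
    simp only [Nat.add_zero] at hp
    have hmap : ((pvEnum 0).map (fun s => p ++ s)) = [p] := by simp [pvEnum]
    rw [hmap]
    by_cases hgt : ((pvIdx 0 p).length : Int) > k
    · rw [if_pos hgt]
      rw [pvIdx_length] at hgt
      have hchk : pvCheck edges k p = false := by
        have : ¬ ((p.count true : Int) ≤ k) := by omega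
        simp [pvCheck, this]
      rw [List.find?_cons_of_neg (by simp [hchk]), List.find?_nil]
    · rw [if_neg hgt, if_pos hp]
      rw [pvIdx_length] at hgt
      have hcov : pvMkCover N (pvIdx 0 p) = p := by
        rw [pvMkCover_idx N p (le_of_eq hp), hp]
        simp
      rw [hcov]
      have hle : (p.count true : Int) ≤ k := by omega
      by_cases hca : pvCoversAll edges p = true
      · rw [if_pos hca, List.find?_cons_of_pos (by simp [pvCheck, hle, hca])]
      · rw [if_neg hca, List.find?_cons_of_neg (by simp [pvCheck, hca]), List.find?_nil]
  | succ m ih =>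
    intro p hp
    rw [pvRecA]
    have hlt : p.length < N := by omega
    have hne : ¬ p.length = N := by omega
    by_cases hgt : ((pvIdx 0 p).length : Int) > k
    · rw [if_pos hgt]
      rw [pvIdx_length] at hgt
      symm
      rw [List.find?_eq_none]
      intro c hc
      simp only [List.mem_map] at hc
      obtain ⟨s, _, rfl⟩ := hc
      have hfalse : pvCheck edges k (p ++ s) = false := by
        rw [pvCheck]
        have h2 : (decide ((((p ++ s).count true : Nat) : Int) ≤ k)) = false := by
          rw [decide_eq_false_iff_not, List.count_append]
          push_cast
          omega
        rw [h2, Bool.false_and]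
      simp [hfalse]
    · rw [if_neg hgt, if_neg hne, dif_pos hlt]
      have ih1 := ih (p ++ [false]) (by simp; omega)
      have ih2 := ih (p ++ [true]) (by simp; omega)
      have e1 : pvIdx 0 (p ++ [false]) = pvIdx 0 p := by rw [pvIdx_append]; simp
      have e2 : pvIdx 0 (p ++ [true]) = pvIdx 0 p ++ [(p.length : Int)] := by
        rw [pvIdx_append]; simp
      have l1 : (p ++ [false]).length = p.length + 1 := by simp
      have l2 : (p ++ [true]).length = p.length + 1 := by simp
      rw [e1, l1] at ih1
      rw [e2, l2] at ih2
      rw [ih1, ih2]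
      have hsplit : ((pvEnum (m + 1)).map (fun s => p ++ s)) =
          ((pvEnum m).map (fun s => (p ++ [false]) ++ s)) ++
          ((pvEnum m).map (fun s => (p ++ [true]) ++ s)) := by
        simp only [pvEnum, List.map_append, List.map_map]
        congr 1 <;> apply List.map_congr_left <;> intro s _ <;> simp
      rw [hsplit, List.find?_append]
      cases h1 : ((pvEnum m).map (fun s => (p ++ [false]) ++ s)).find? (pvCheck edges k) <;>
        simp [Option.or]

theorem pvFeasible_nil (b : Nat) (lo : Int) : pvFeasible b [] lo = true := by
  cases b <;> simp [pvFeasible]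

-- adding back a branched-on vertex to a cover of the reduced graph
theorem pvEx_of_removed (es : List (Int × Int)) (b : Nat) (lo w : Int) (hw : lo ≤ w)
    (h : pvEx (pvRemoveTouching es w) b lo) : pvEx es (b + 1) lo := by
  obtain ⟨S, hnd, hlo, hlen, hcov⟩ := h
  by_cases hmem : w ∈ S
  · refine ⟨S, hnd, hlo, Nat.le_succ_of_le hlen, ?_⟩
    intro e he
    by_cases h1 : e.1 = w
    · exact Or.inl (h1 ▸ hmem)
    · by_cases h2 : e.2 = w
      · exact Or.inr (h2 ▸ hmem)
      · exact hcov e (by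
          simp only [pvRemoveTouching, List.mem_filter, Bool.and_eq_true, bne_iff_ne, ne_eq,
            decide_eq_true_eq]
          exact ⟨he, h1, h2⟩)
  · refine ⟨w :: S, List.nodup_cons.mpr ⟨hmem, hnd⟩, ?_, by simpa using hlen, ?_⟩
    · intro x hx
      rcases List.mem_cons.mp hx with rfl | hx
      · exact hw
      · exact hlo x hx
    · intro e he
      by_cases h1 : e.1 = w
      · exact Or.inl (by rw [h1]; exact List.mem_cons_self ..)
      · by_cases h2 : e.2 = w
        · exact Or.inr (by rw [h2]; exact List.mem_cons_self ..)
        · rcases hcov e (by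
            simp only [pvRemoveTouching, List.mem_filter, Bool.and_eq_true, bne_iff_ne, ne_eq,
              decide_eq_true_eq]
            exact ⟨he, h1, h2⟩) with h | h
          · exact Or.inl (List.mem_cons_of_mem _ h)
          · exact Or.inr (List.mem_cons_of_mem _ h)

-- the oracle is exact
theorem pvFeasible_iff : ∀ (b : Nat) (es : List (Int × Int)) (lo : Int),
    pvFeasible b es lo = true ↔ pvEx es b lo := by
  intro b
  induction b with
  | zero =>
    intro es lo
    cases es with
    | nil =>
      constructor
      · intro _; exact ⟨[], by simp, by simp, by simp, by simp⟩
      · intro _; exact pvFeasible_nil 0 lo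
    | cons e rest =>
      constructor
      · intro h; simp [pvFeasible] at h
      · rintro ⟨S, _, _, hlen, hcov⟩
        have hS : S = [] := List.length_eq_zero_iff.mp (Nat.le_zero.mp hlen)
        subst hS
        rcases hcov e (by simp) with h | h <;> simp at h
  | succ b ih =>
    intro es lo
    cases es with
    | nil =>
      constructor
      · intro _; exact ⟨[], by simp, by simp, by simp, by simp⟩
      · intro _; exact pvFeasible_nil (b + 1) lo
    | cons e rest =>
      obtain ⟨u, v⟩ := e
      constructor
      · intro h
        simp only [pvFeasible, Bool.or_eq_true, Bool.and_eq_true, decide_eq_true_eq] at h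
        rcases h with ⟨hu, hf⟩ | ⟨hv, hf⟩
        · exact pvEx_of_removed _ _ _ _ hu ((ih _ _).mp hf)
        · exact pvEx_of_removed _ _ _ _ hv ((ih _ _).mp hf)
      · rintro ⟨S, hnd, hlo, hlen, hcov⟩
        simp only [pvFeasible, Bool.or_eq_true, Bool.and_eq_true, decide_eq_true_eq]
        have herase : ∀ w : Int, w ∈ S →
            pvFeasible b (pvRemoveTouching ((u, v) :: rest) w) lo = true := by
          intro w hw
          apply (ih _ _).mpr
          refine ⟨S.erase w, hnd.erase _, ?_, ?_, ?_⟩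
          · intro x hx; exact hlo x (List.mem_of_mem_erase hx)
          · have := List.length_erase_of_mem hw
            omega
          · intro e he
            simp only [pvRemoveTouching, List.mem_filter, Bool.and_eq_true, bne_iff_ne, ne_eq,
              decide_eq_true_eq] at he
            obtain ⟨he, h1, h2⟩ := he
            rcases hcov e he with h | h
            · exact Or.inl ((List.mem_erase_of_ne h1).mpr h)
            · exact Or.inr ((List.mem_erase_of_ne h2).mpr h)
        rcases hcov (u, v) (List.mem_cons_self ..) with h | h
        · exact Or.inl ⟨hlo u h, herase u h⟩
        · exact Or.inr ⟨hlo v h, herase v h⟩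

-- pyGetD facts specialised to nonnegative indices (all indices here are, under Pre_)
theorem pvGetD_toNat (xs : List Bool) (w : Int) (h : 0 ≤ w) :
    PySem.List.pyGetD xs w false = xs.getD w.toNat false := by
  have hcast : ((w.toNat : Nat) : Int) = w := Int.toNat_of_nonneg h
  calc PySem.List.pyGetD xs w false
      = PySem.List.pyGetD xs ((w.toNat : Nat) : Int) false := by rw [hcast]
    _ = xs.getD w.toNat false := PySem.List.pyGetD_natCast ..

theorem pvGetD_snoc (xs : List Bool) (b : Bool) (w : Int) (h : 0 ≤ w) :
    PySem.List.pyGetD (xs ++ [b]) w false =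
      (PySem.List.pyGetD xs w false || (b && decide (w = (xs.length : Int)))) := by
  rw [pvGetD_toNat _ _ h, pvGetD_toNat _ _ h]
  rcases Nat.lt_trichotomy w.toNat xs.length with hlt | heq | hgt
  · rw [List.getD_append _ _ _ _ hlt]
    have hne : ¬ (w = (xs.length : Int)) := by omega
    simp [hne]
  · have hw : w = (xs.length : Int) := by omega
    rw [List.getD_append_right _ _ _ _ (le_of_eq heq.symm), heq, Nat.sub_self]
    have hx : xs.getD xs.length false = false := List.getD_eq_default _ _ (Nat.le_refl _)
    rw [hx, hw]
    simp
  · have h1 : xs.getD w.toNat false = false := List.getD_eq_default _ _ (le_of_lt hgt)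
    have h2 : ([b] : List Bool).getD (w.toNat - xs.length) false = false :=
      List.getD_eq_default _ _ (by simp; omega)
    have hne : ¬ (w = (xs.length : Int)) := by omega
    rw [List.getD_append_right _ _ _ _ (le_of_lt hgt), h1, h2]
    simp [hne]

theorem pvRem_snoc_false (edges : List (Int × Int)) (p : List Bool) (N : Nat)
    (hE : ∀ e ∈ edges, 0 ≤ e.1 ∧ e.1 < (N : Int) ∧ 0 ≤ e.2 ∧ e.2 < (N : Int)) :
    pvRem edges (p ++ [false]) = pvRem edges p := by
  unfold pvRem
  apply List.filter_congr
  intro e he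
  obtain ⟨h1, _, h2, _⟩ := hE e he
  rw [pvGetD_snoc _ _ _ h1, pvGetD_snoc _ _ _ h2]
  simp

theorem pvRem_snoc_true (edges : List (Int × Int)) (p : List Bool) (N : Nat)
    (hE : ∀ e ∈ edges, 0 ≤ e.1 ∧ e.1 < (N : Int) ∧ 0 ≤ e.2 ∧ e.2 < (N : Int)) :
    pvRem edges (p ++ [true]) = pvRemoveTouching (pvRem edges p) ((p.length : Nat) : Int) := by
  unfold pvRem pvRemoveTouching
  rw [List.filter_filter]
  apply List.filter_congr
  intro e he
  obtain ⟨h1, _, h2, _⟩ := hE e he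
  rw [pvGetD_snoc _ _ _ h1, pvGetD_snoc _ _ _ h2]
  by_cases e1 : e.1 = ((p.length : Nat) : Int) <;> by_cases e2 : e.2 = ((p.length : Nat) : Int) <;>
    simp [e1, e2]

-- bridge: covers-as-sets over the residual graph ↔ cover vectors completing the prefix
theorem pvBridge (edges : List (Int × Int)) (N : Nat) (k : Int)
    (hE : ∀ e ∈ edges, 0 ≤ e.1 ∧ e.1 < (N : Int) ∧ 0 ≤ e.2 ∧ e.2 < (N : Int))
    (hk : 0 ≤ k) (p : List Bool) (hp : p.length ≤ N) (hc : (p.count true : Int) ≤ k) :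
    pvEx (pvRem edges p) (k.toNat - p.count true) (p.length) ↔
      ∃ s : List Bool, s.length = N - p.length ∧ pvCheck edges k (p ++ s) = true := by
  have hkk : (p.count true : Int) ≤ (k.toNat : Int) := by omega
  constructor
  · rintro ⟨S, hnd, hlo, hlen, hcov⟩
    set m := N - p.length with hm
    refine ⟨(List.range m).map (fun t => decide ((((p.length + t : Nat)) : Int) ∈ S)), by simp, ?_⟩
    set s : List Bool := (List.range m).map (fun t => decide ((((p.length + t : Nat)) : Int) ∈ S))
      with hs
    have hsl : s.length = m := by simp [hs]
    have hgetd : ∀ t : Nat, t < m →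
        s.getD t false = decide ((((p.length + t : Nat)) : Int) ∈ S) := by
      intro t ht
      simp [hs, List.getD, ht]
    have hsub : pvIdx p.length s ⊆ S := by
      intro x hx
      have hb := pvMem_pvIdx hx
      have ht : x.toNat - p.length < m := by
        rw [hsl] at hb; omega
      have hxeq : x = (((p.length + (x.toNat - p.length) : Nat)) : Int) := by push_cast; omega
      rw [hxeq, pvMem_pvIdx_iff, hgetd _ ht, decide_eq_true_eq] at hx
      rwa [← hxeq] at hx
    have hcnt : s.count true ≤ S.length := by
      have := ((pvIdx_nodup p.length s).subperm hsub).length_le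
      rwa [pvIdx_length] at this
    have hkey : ∀ w : Int, w ∈ S → 0 ≤ w → w < (N : Int) →
        PySem.List.pyGetD (p ++ s) w false = true := by
      intro w hw h0 hN
      have hge : p.length ≤ w.toNat := by
        have := hlo w hw; omega
      have ht : w.toNat - p.length < m := by omega
      rw [pvGetD_toNat _ _ h0, List.getD_append_right _ _ _ _ hge, hgetd _ ht]
      have heq : (((p.length + (w.toNat - p.length) : Nat)) : Int) = w := by push_cast; omega
      rw [heq]
      simpa using hw
    have hcv : pvCoversAll edges (p ++ s) = true := by
      rw [pvCoversAll, List.all_eq_true]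
      intro e he
      obtain ⟨h10, h1N, h20, h2N⟩ := hE e he
      show (PySem.List.pyGetD (p ++ s) e.1 false || PySem.List.pyGetD (p ++ s) e.2 false) = true
      by_cases htc : (PySem.List.pyGetD p e.1 false || PySem.List.pyGetD p e.2 false) = true
      · have hone : ∀ w : Int, 0 ≤ w → PySem.List.pyGetD p w false = true →
            PySem.List.pyGetD (p ++ s) w false = true := by
          intro w h0 hg
          rw [pvGetD_toNat _ _ h0] at hg ⊢
          have hltp : w.toNat < p.length := by
            by_contra hcon
            rw [List.getD_eq_default _ _ (le_of_not_gt hcon)] at hg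
            cases hg
          rw [List.getD_append _ _ _ _ hltp]
          exact hg
        rcases (Bool.or_eq_true ..).mp htc with hg | hg
        · exact (Bool.or_eq_true ..).mpr (Or.inl (hone _ h10 hg))
        · exact (Bool.or_eq_true ..).mpr (Or.inr (hone _ h20 hg))
      · simp only [Bool.not_eq_true] at htc
        have hrem : e ∈ pvRem edges p := by
          rw [pvRem, List.mem_filter]
          exact ⟨he, by simp [htc]⟩
        rcases hcov e hrem with hw | hw
        · exact (Bool.or_eq_true ..).mpr (Or.inl (hkey _ hw h10 h1N))
        · exact (Bool.or_eq_true ..).mpr (Or.inr (hkey _ hw h20 h2N))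
    rw [pvCheck, hcv, Bool.and_true, decide_eq_true_eq, List.count_append]
    push_cast
    omega
  · rintro ⟨s, hsl, hs⟩
    rw [pvCheck, Bool.and_eq_true, decide_eq_true_eq] at hs
    obtain ⟨hcount, hcv⟩ := hs
    refine ⟨pvIdx p.length s, pvIdx_nodup _ _, ?_, ?_, ?_⟩
    · intro x hx
      have := pvMem_pvIdx hx
      exact_mod_cast this.1
    · rw [pvIdx_length]
      rw [List.count_append] at hcount
      push_cast at hcount
      omega
    · intro e he
      have herem := he
      rw [pvRem, List.mem_filter] at herem
      obtain ⟨hee, hrr⟩ := herem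
      simp only [Bool.not_eq_eq_eq_not, Bool.not_true, Bool.or_eq_false_iff] at hrr
      obtain ⟨hg1, hg2⟩ := hrr
      obtain ⟨h10, h1N, h20, h2N⟩ := hE e hee
      rw [pvCoversAll, List.all_eq_true] at hcv
      have hall := hcv e hee
      have hkey : ∀ w : Int, 0 ≤ w → w < (N : Int) →
          PySem.List.pyGetD p w false = false →
          PySem.List.pyGetD (p ++ s) w false = true → w ∈ pvIdx p.length s := by
        intro w h0 hN hpf hap
        rw [pvGetD_toNat _ _ h0] at hap hpf
        have hge : p.length ≤ w.toNat := by
          by_contra hcon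
          push_neg at hcon
          rw [List.getD_append _ _ _ _ hcon] at hap
          rw [hap] at hpf; cases hpf
        rw [List.getD_append_right _ _ _ _ hge] at hap
        have heq : w = (((p.length + (w.toNat - p.length) : Nat)) : Int) := by push_cast; omega
        rw [heq, pvMem_pvIdx_iff]
        exact hap
      have hall' : (PySem.List.pyGetD (p ++ s) e.1 false ||
          PySem.List.pyGetD (p ++ s) e.2 false) = true := hall
      rcases (Bool.or_eq_true ..).mp hall' with h | h
      · exact Or.inl (hkey _ h10 h1N hg1 h)
      · exact Or.inr (hkey _ h20 h2N hg2 h)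

-- B's loop reconstructs exactly the vector find? returns
theorem pvBuildB_eq (edges : List (Int × Int)) (N : Nat) (k : Int)
    (hE : ∀ e ∈ edges, 0 ≤ e.1 ∧ e.1 < (N : Int) ∧ 0 ≤ e.2 ∧ e.2 < (N : Int)) (hk : 0 ≤ k) :
    ∀ (m : Nat) (p : List Bool), p.length + m = N → (p.count true : Int) ≤ k →
      (∃ s : List Bool, s.length = m ∧ pvCheck edges k (p ++ s) = true) →
      ((pvEnum m).map (fun s => p ++ s)).find? (pvCheck edges k) =
        some (p ++ pvBuildB m p.length (pvRem edges p) (k.toNat - p.count true)) := by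
  intro m
  induction m with
  | zero =>
    intro p hp hc hex
    obtain ⟨s, hsl, hs⟩ := hex
    have hnil : s = [] := List.length_eq_zero_iff.mp hsl
    subst hnil
    rw [List.append_nil] at hs
    have hmap : ((pvEnum 0).map (fun s => p ++ s)) = [p] := by simp [pvEnum]
    rw [hmap, List.find?_cons_of_pos (by simp [hs])]
    simp [pvBuildB]
  | succ m ih =>
    intro p hp hc hex
    have hsplit : ((pvEnum (m + 1)).map (fun s => p ++ s)) =
        ((pvEnum m).map (fun s => (p ++ [false]) ++ s)) ++
        ((pvEnum m).map (fun s => (p ++ [true]) ++ s)) := by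
      simp only [pvEnum, List.map_append, List.map_map]
      congr 1 <;> apply List.map_congr_left <;> intro s _ <;> simp
    rw [hsplit, List.find?_append]
    have hcfn : (p ++ [false]).count true = p.count true := by simp [List.count_append]
    have hlf : (p ++ [false]).length = p.length + 1 := by simp
    have hremf := pvRem_snoc_false edges p N hE
    have hbridge := pvBridge edges N k hE hk (p ++ [false])
      (by simp; omega) (by rw [hcfn]; exact hc)
    rw [hremf, hcfn, hlf] at hbridge
    have hNl : N - (p.length + 1) = m := by omega
    rw [hNl] at hbridge
    have hcast : (((p.length + 1 : Nat)) : Int) = (p.length : Int) + 1 := by push_cast; ring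
    rw [hcast] at hbridge
    rw [pvBuildB]
    by_cases hft : pvFeasible (k.toNat - p.count true) (pvRem edges p)
        ((p.length : Int) + 1) = true
    · -- vertex p.length can stay excluded (lexicographic minimality keeps False)
      have hexf := hbridge.mp ((pvFeasible_iff ..).mp hft)
      have ihf := ih (p ++ [false]) (by simp; omega) (by rw [hcfn]; exact hc) hexf
      rw [hremf, hcfn, hlf] at ihf
      rw [if_pos hft, ihf]
      simp [Option.or, List.append_assoc]
    · -- vertex p.length must be included
      have hnex : ¬ ∃ s : List Bool, s.length = m ∧
          pvCheck edges k ((p ++ [false]) ++ s) = true := by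
        intro hcon
        apply hft
        apply (pvFeasible_iff ..).mpr
        exact hbridge.mpr hcon
      have hnone : ((pvEnum m).map (fun s => (p ++ [false]) ++ s)).find?
          (pvCheck edges k) = none := by
        rw [List.find?_eq_none]
        intro c hcmem
        simp only [List.mem_map] at hcmem
        obtain ⟨s, hsm, rfl⟩ := hcmem
        intro hchk
        exact hnex ⟨s, pvLength_mem_enum hsm, hchk⟩
      obtain ⟨s, hsl, hs⟩ := hex
      cases s with
      | nil => simp at hsl
      | cons s0 stail =>
        have hs0 : s0 = true := by
          cases s0
          · exfalso
            apply hnex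
            refine ⟨stail, by simpa using hsl, ?_⟩
            rw [List.append_assoc]
            simpa using hs
          · rfl
        subst hs0
        have hstail : pvCheck edges k ((p ++ [true]) ++ stail) = true := by
          rw [List.append_assoc]
          simpa using hs
        have hct : (p ++ [true]).count true = p.count true + 1 := by
          simp [List.count_append]
        have hcle : ((p ++ [true]).count true : Int) ≤ k := by
          have hchk := hstail
          rw [pvCheck, Bool.and_eq_true, decide_eq_true_eq] at hchk
          have hcc := hchk.1
          rw [List.count_append] at hcc
          push_cast at hcc ⊢
          omega
        have hlt2 : (p ++ [true]).length = p.length + 1 := by simp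
        have iht := ih (p ++ [true]) (by simp; omega) hcle
          ⟨stail, by simpa using hsl, hstail⟩
        rw [pvRem_snoc_true edges p N hE, hct, hlt2] at iht
        have hb1 : k.toNat - (p.count true + 1) = (k.toNat - p.count true) - 1 := by omega
        rw [hb1] at iht
        rw [if_neg hft, hnone, iht]
        simp [Option.or, List.append_assoc]

-- ===== VERDICT (by name: the statement is the Claim_ definition above) =====
theorem solve_vertex_cover_bruteforce_spec : Claim_equal_solve_vertex_cover_bruteforce := by
  intro edges n k _hdom hpre
  unfold Spec_solve_vertex_cover_bruteforce
  unfold solve_vertex_cover_bruteforce solve_vertex_cover_bruteforce_alt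
  by_cases hk : k < 0
  · rw [pvRecA]
    simp [hk]
  · push_neg at hk
    rcases hpre with hneg | ⟨hn, hbound⟩
    · omega
    set N := n.toNat with hN
    have hNn : ((N : Nat) : Int) = n := Int.toNat_of_nonneg hn
    have hE : ∀ e ∈ edges, 0 ≤ e.1 ∧ e.1 < (N : Int) ∧ 0 ≤ e.2 ∧ e.2 < (N : Int) := by
      intro e he
      obtain ⟨a, b, c, d⟩ := hbound e he
      rw [hNn]
      exact ⟨a, b, c, d⟩
    have hA : pvRecA edges N k 0 [] = (pvEnum N).find? (pvCheck edges k) := by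
      have := pvRecA_eq_find edges N k N [] (by simp)
      simpa [pvIdx] using this
    have hrem0 : pvRem edges [] = edges := by
      rw [pvRem, List.filter_eq_self]
      intro e he
      obtain ⟨h1, _, h2, _⟩ := hE e he
      rw [pvGetD_toNat _ _ h1, pvGetD_toNat _ _ h2]
      simp [List.getD]
    have hbridge := pvBridge edges N k hE hk [] (by simp) (by simpa using hk)
    rw [hrem0] at hbridge
    simp only [List.length_nil, List.count_nil, Nat.sub_zero, Nat.cast_zero] at hbridge
    rw [if_neg (by omega)]
    by_cases hg : pvFeasible k.toNat edges 0 = true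
    · have hex := hbridge.mp ((pvFeasible_iff ..).mp (by simpa using hg))
      have hmain := pvBuildB_eq edges N k hE hk N [] (by simp) (by simpa using hk)
        (by simpa using hex)
      rw [hrem0] at hmain
      simp only [List.length_nil, List.count_nil, Nat.sub_zero, List.nil_append] at hmain
      have hmap : (pvEnum N).map (fun s : List Bool => s) = pvEnum N := by simp
      rw [hmap] at hmain
      rw [hA, hmain, if_pos hg]
    · rw [if_neg hg, hA, List.find?_eq_none]
      intro c hcmem hchk
      have hcl : c.length = N := pvLength_mem_enum hcmem
      apply hg
      apply (pvFeasible_iff ..).mpr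
      apply hbridge.mpr
      exact ⟨c, by simp [hcl], by simpa using hchk⟩
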